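-- pv_equiv track=rewrite | github.com/xhinini/agent-based-issue-resolution | utils/taxonomy_aggregate.py | _distributions
-- ===== SOURCE A (Python) =====
-- from typing import Dict, List, Tuple
--
-- def _distributions(rows: List[Dict[str, str]]) -> Tuple[Dict[int, int], Dict[str, Dict[int, int]]]:
--     overall: Dict[int, int] = {}
--     by_model: Dict[str, Dict[int, int]] = {}
--     for r in rows:
--         c = (r.get('class') or '').strip()
--         if not c.isdigit():
--             continue
--         label = int(c)
--         m = r.get('model_name', '')
--         overall[label] = overall.get(label, 0) + 1
--         by_model.setdefault(m, {})
--         by_model[m][label] = by_model[m].get(label, 0) + 1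
--     return overall, by_model
-- ===== SOURCE B (Python) =====
-- from typing import Dict, List, Tuple
--
-- def _distributions(rows: List[Dict[str, str]]) -> Tuple[Dict[int, int], Dict[str, Dict[int, int]]]:
--     # Collect the valid (label, model) pairs once, then build each dict
--     # declaratively from that list with count-based comprehensions.
--     pairs = []
--     for r in rows:
--         c = (r.get('class') or '').strip()
--         if c.isdigit():
--             pairs.append((int(c), r.get('model_name', '')))
--
--     def tally(xs):
--         return {x: xs.count(x) for x in xs}
--
--     overall = tally([lab for lab, _ in pairs])
--     by_model = {m: tally([lab for lab, mm in pairs if mm == m]) for _, m in pairs}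
--     return overall, by_model
-- ===== Notes on version B (the rewrite author's own statement) =====
-- stated objective: alternative
-- what changed: Replaces the single pass of incremental dict-counter updates with a filter-then-tally decomposition: extract the valid (label, model) pairs once, then build overall and each per-model sub-dict declaratively via count-based dict comprehensions.
import Mathlib
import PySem

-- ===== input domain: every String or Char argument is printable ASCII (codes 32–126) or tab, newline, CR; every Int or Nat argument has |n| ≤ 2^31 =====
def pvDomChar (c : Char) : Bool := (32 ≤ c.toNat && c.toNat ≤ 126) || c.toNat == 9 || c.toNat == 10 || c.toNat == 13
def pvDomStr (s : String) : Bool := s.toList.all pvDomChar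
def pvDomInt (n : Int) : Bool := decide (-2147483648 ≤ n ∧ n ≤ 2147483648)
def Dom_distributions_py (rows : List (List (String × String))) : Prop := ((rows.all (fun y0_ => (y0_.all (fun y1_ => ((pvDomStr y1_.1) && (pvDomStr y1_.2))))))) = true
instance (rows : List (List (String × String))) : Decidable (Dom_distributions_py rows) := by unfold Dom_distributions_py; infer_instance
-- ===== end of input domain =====

-- B replaces A's single pass of incremental dict updates by a filter-then-tally
-- decomposition (extract valid (label, model) pairs, then build each dict by
-- count-based comprehensions); same results, not claimed faster.

-- ===== PORT A =====
def distributions_py (rows : List (List (String × String))) : (List (Int × Int)) × (List (String × List (Int × Int))) :=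
  let st := rows.foldl
    (fun (st : PySem.Dict Int Int × PySem.Dict String (PySem.Dict Int Int)) r =>
      let c := PySem.Str.strip (((PySem.Dict.mk r).get? "class").getD "")
      if PySem.Str.strIsdigit c then
        let label : Int := (PySem.Int.ofStr? c).getD 0
        let m := ((PySem.Dict.mk r).get? "model_name").getD ""
        let overall := st.1.insert label (st.1.getD label 0 + 1)
        let bm := st.2.setdefault m PySem.Dict.empty
        (overall, bm.insert m ((bm.getD m PySem.Dict.empty).insert label ((bm.getD m PySem.Dict.empty).getD label 0 + 1)))
      else st)
    (PySem.Dict.empty, PySem.Dict.empty)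
  (st.1.items, st.2.items.map (fun p => (p.1, p.2.items)))

-- ===== PORT B =====
-- tally(xs) = {x: xs.count(x) for x in xs}
def pvTally (xs : List Int) : PySem.Dict Int Int :=
  xs.foldl (fun d x => d.insert x ((xs.count x : Int))) PySem.Dict.empty

def distributions_py_alt (rows : List (List (String × String))) : (List (Int × Int)) × (List (String × List (Int × Int))) :=
  let pairs : List (Int × String) := rows.foldl
    (fun acc r =>
      let c := PySem.Str.strip (((PySem.Dict.mk r).get? "class").getD "")
      if PySem.Str.strIsdigit c then
        acc ++ [((PySem.Int.ofStr? c).getD 0, ((PySem.Dict.mk r).get? "model_name").getD "")]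
      else acc)
    []
  let overall := pvTally (pairs.map (·.1))
  let by_model := pairs.foldl
    (fun d p => d.insert p.2 (pvTally ((pairs.filter (fun q => q.2 == p.2)).map (·.1))))
    PySem.Dict.empty
  (overall.items, by_model.items.map (fun p => (p.1, p.2.items)))

-- ===== PRECONDITION & SPEC =====
def Spec_distributions_py (rows : List (List (String × String))) (out : (List (Int × Int)) × (List (String × List (Int × Int)))) : Prop := out = distributions_py_alt rows
instance (rows : List (List (String × String))) (out : (List (Int × Int)) × (List (String × List (Int × Int)))) : Decidable (Spec_distributions_py rows out) := by unfold Spec_distributions_py; infer_instance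

-- ===== CLAIM (what is proved, stated in full; the proofs are below) =====
def Claim_equal_distributions_py : Prop := ∀ (rows : List (List (String × String))), Dom_distributions_py rows → Spec_distributions_py rows (distributions_py rows)

-- ===== LEMMAS AND PROOFS =====

-- proof-side names for the shared row parsing and A's loop step
def pvP (r : List (String × String)) : Bool :=
  PySem.Str.strIsdigit (PySem.Str.strip (((PySem.Dict.mk r).get? "class").getD ""))
def pvF (r : List (String × String)) : Int × String :=
  ((PySem.Int.ofStr? (PySem.Str.strip (((PySem.Dict.mk r).get? "class").getD ""))).getD 0,
   ((PySem.Dict.mk r).get? "model_name").getD "")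
def pvPairs (rows : List (List (String × String))) : List (Int × String) :=
  (rows.filter pvP).map pvF
def pvStepO (o : PySem.Dict Int Int) (lab : Int) : PySem.Dict Int Int :=
  o.insert lab (o.getD lab 0 + 1)
def pvStepA (st : PySem.Dict Int Int × PySem.Dict String (PySem.Dict Int Int)) (p : Int × String) :
    PySem.Dict Int Int × PySem.Dict String (PySem.Dict Int Int) :=
  (pvStepO st.1 p.1, st.2.insert p.2 (pvStepO (st.2.getD p.2 PySem.Dict.empty) p.1))

-- the common normal form both ports are reduced to
def pvOut (rows : List (List (String × String))) : (List (Int × Int)) × (List (String × List (Int × Int))) :=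
  ((PySem.Set.ofList ((pvPairs rows).map (·.1))).map
      (fun k => (k, (((pvPairs rows).map (·.1)).count k : Int))),
   (PySem.Set.ofList ((pvPairs rows).map (·.2))).map
      (fun m => (m,
        (PySem.Set.ofList (((pvPairs rows).filter (fun q => q.2 == m)).map (·.1))).map
          (fun k => (k, ((((pvPairs rows).filter (fun q => q.2 == m)).map (·.1)).count k : Int))))))

-- setdefault-then-update collapses to one insert
lemma pv_updBM (bm : PySem.Dict String (PySem.Dict Int Int)) (m : String) (lab : Int) :
    ((bm.setdefault m PySem.Dict.empty).insert m
      (((bm.setdefault m PySem.Dict.empty).getD m PySem.Dict.empty).insert lab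
        (((bm.setdefault m PySem.Dict.empty).getD m PySem.Dict.empty).getD lab 0 + 1)))
    = bm.insert m (pvStepO (bm.getD m PySem.Dict.empty) lab) := by
  by_cases h : bm.contains m = true
  · rw [PySem.Dict.setdefault_of_contains bm PySem.Dict.empty h]
    rfl
  · rw [PySem.Dict.setdefault_of_not_contains bm PySem.Dict.empty (by simpa using h),
        PySem.Dict.insert_insert_self, PySem.Dict.getD_insert_self,
        PySem.Dict.getD_of_not_contains bm PySem.Dict.empty (by simpa using h)]
    rfl

-- A's loop over rows is the pvStepA fold over the valid pairs
lemma pv_foldA (rows : List (List (String × String)))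
    (st : PySem.Dict Int Int × PySem.Dict String (PySem.Dict Int Int)) :
    rows.foldl (fun (st : PySem.Dict Int Int × PySem.Dict String (PySem.Dict Int Int)) r =>
      let c := PySem.Str.strip (((PySem.Dict.mk r).get? "class").getD "")
      if PySem.Str.strIsdigit c then
        let label : Int := (PySem.Int.ofStr? c).getD 0
        let m := ((PySem.Dict.mk r).get? "model_name").getD ""
        let overall := st.1.insert label (st.1.getD label 0 + 1)
        let bm := st.2.setdefault m PySem.Dict.empty
        (overall, bm.insert m ((bm.getD m PySem.Dict.empty).insert label ((bm.getD m PySem.Dict.empty).getD label 0 + 1)))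
      else st) st
    = (pvPairs rows).foldl pvStepA st := by
  induction rows generalizing st with
  | nil => rfl
  | cons r rest ih =>
    rw [List.foldl_cons]
    rw [show pvPairs (r :: rest) = if pvP r = true then pvF r :: pvPairs rest else pvPairs rest by
      simp only [pvPairs, List.filter_cons]; by_cases hp : pvP r = true <;> simp [hp]]
    by_cases hp : PySem.Str.strIsdigit (PySem.Str.strip (((PySem.Dict.mk r).get? "class").getD "")) = true
    · rw [if_pos (show pvP r = true from hp), List.foldl_cons, ih]
      exact congrArg (List.foldl pvStepA · (pvPairs rest))
        (by simp only [hp, if_true, pvStepA, pvStepO, pvF, pv_updBM])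
    · rw [if_neg (show ¬ pvP r = true from hp), ih]
      refine congrArg (List.foldl pvStepA · (pvPairs rest)) ?_
      rw [Bool.not_eq_true] at hp
      simp only [hp, Bool.false_eq_true, if_false]

-- the product fold splits componentwise
lemma pv_fold_split (L : List (Int × String))
    (st : PySem.Dict Int Int × PySem.Dict String (PySem.Dict Int Int)) :
    L.foldl pvStepA st
    = (L.foldl (fun o p => pvStepO o p.1) st.1,
       L.foldl (fun bm p => bm.insert p.2 (pvStepO (bm.getD p.2 PySem.Dict.empty) p.1)) st.2) := by
  induction L generalizing st with
  | nil => rfl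
  | cons p rest ih => simp only [List.foldl_cons, ih]; rfl

-- A's overall is the counter of the labels
lemma pv_overallA (L : List (Int × String)) :
    L.foldl (fun o p => pvStepO o p.1) PySem.Dict.empty = PySem.Dict.counter (L.map (·.1)) := by
  rw [← PySem.Dict.foldl_insert_getD_add_one_eq_counter, List.foldl_map]
  rfl

-- lookup in a fold that inserts key x ↦ v (key x)
lemma pv_getD_fold_const {β κ ν : Type} [BEq κ] [LawfulBEq κ]
    (xs : List β) (key : β → κ) (v : κ → ν) (d0 : PySem.Dict κ ν) (k : κ) (dflt : ν) :
    (xs.foldl (fun d x => d.insert (key x) (v (key x))) d0).getD k dflt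
    = if k ∈ xs.map key then v k else d0.getD k dflt := by
  induction xs generalizing d0 with
  | nil => simp
  | cons x rest ih =>
    simp only [List.foldl_cons, List.map_cons, List.mem_cons, ih]
    by_cases hr : k ∈ rest.map key
    · simp [hr]
    · by_cases hx : k = key x
      · subst hx; simp [hr, PySem.Dict.getD_insert_self]
      · simp [hr, hx, PySem.Dict.getD_insert_of_ne _ _ _ hx]

-- items of such a fold from empty
lemma pv_items_fold_const {β κ ν : Type} [BEq κ] [LawfulBEq κ]
    (xs : List β) (key : β → κ) (v : κ → ν) (dflt : ν) :
    (xs.foldl (fun d x => d.insert (key x) (v (key x))) PySem.Dict.empty).items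
    = (PySem.Set.ofList (xs.map key)).map (fun k => (k, v k)) := by
  have hnd : (xs.foldl (fun d x => d.insert (key x) (v (key x))) PySem.Dict.empty).keys.Nodup := by
    apply PySem.Dict.nodup_keys_foldl_insert_key xs key (fun d x => v (key x))
    simp [PySem.Dict.keys_empty]
  have hk : (xs.foldl (fun d x => d.insert (key x) (v (key x))) PySem.Dict.empty).keys
      = PySem.Set.ofList (xs.map key) := by
    rw [PySem.Dict.keys_foldl_insert_key xs key (fun d x => v (key x)), PySem.Dict.keys_empty,
        PySem.Set.update_nil_left]
  rw [PySem.Dict.items_eq_map_keys _ hnd dflt, hk]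
  apply List.map_congr_left
  intro k hkmem
  have hkx : k ∈ xs.map key := (PySem.Set.mem_ofList _ _).mp hkmem
  rw [pv_getD_fold_const, if_pos hkx]

lemma pv_items_tally (xs : List Int) :
    (pvTally xs).items = (PySem.Set.ofList xs).map (fun k => (k, (xs.count k : Int))) := by
  have h := pv_items_fold_const (κ := Int) (ν := Int) xs id (fun k => (xs.count k : Int)) 0
  simpa [pvTally] using h

-- grouping: per-model lookup in A's by_model fold
lemma pv_getD_bm (L : List (Int × String)) (bm : PySem.Dict String (PySem.Dict Int Int)) (m : String) :
    (L.foldl (fun bm p => bm.insert p.2 (pvStepO (bm.getD p.2 PySem.Dict.empty) p.1)) bm).getD m PySem.Dict.empty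
    = ((L.filter (fun q => q.2 == m)).map (·.1)).foldl pvStepO (bm.getD m PySem.Dict.empty) := by
  induction L generalizing bm with
  | nil => rfl
  | cons p rest ih =>
    simp only [List.foldl_cons, List.filter_cons, ih]
    by_cases hp : p.2 = m
    · subst hp
      simp [PySem.Dict.getD_insert_self]
    · have hb : (p.2 == m) = false := by simpa using hp
      rw [hb]
      simp only [Bool.false_eq_true, if_false]
      rw [PySem.Dict.getD_insert_of_ne _ _ _ (fun h => hp h.symm)]

lemma pv_items_bmA (L : List (Int × String)) :
    (L.foldl (fun bm p => bm.insert p.2 (pvStepO (bm.getD p.2 PySem.Dict.empty) p.1)) PySem.Dict.empty).items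
    = (PySem.Set.ofList (L.map (·.2))).map
        (fun m => (m, PySem.Dict.counter ((L.filter (fun q => q.2 == m)).map (·.1)))) := by
  have hnd : ((L.foldl (fun bm p => bm.insert p.2 (pvStepO (bm.getD p.2 PySem.Dict.empty) p.1)) PySem.Dict.empty)).keys.Nodup := by
    apply PySem.Dict.nodup_keys_foldl_insert_key L (fun p => p.2)
      (fun bm p => pvStepO (bm.getD p.2 PySem.Dict.empty) p.1)
    simp [PySem.Dict.keys_empty]
  have hk : ((L.foldl (fun bm p => bm.insert p.2 (pvStepO (bm.getD p.2 PySem.Dict.empty) p.1)) PySem.Dict.empty)).keys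
      = PySem.Set.ofList (L.map (·.2)) := by
    rw [PySem.Dict.keys_foldl_insert_key L (fun p => p.2)
      (fun bm p => pvStepO (bm.getD p.2 PySem.Dict.empty) p.1), PySem.Dict.keys_empty,
        PySem.Set.update_nil_left]
  rw [PySem.Dict.items_eq_map_keys _ hnd PySem.Dict.empty, hk]
  apply List.map_congr_left
  intro m _
  rw [pv_getD_bm, PySem.Dict.getD_empty]
  rw [← PySem.Dict.foldl_insert_getD_add_one_eq_counter]
  rfl

lemma pv_items_bmB (L : List (Int × String)) :
    (L.foldl (fun d p => d.insert p.2 (pvTally ((L.filter (fun q => q.2 == p.2)).map (·.1)))) PySem.Dict.empty).items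
    = (PySem.Set.ofList (L.map (·.2))).map (fun m => (m, pvTally ((L.filter (fun q => q.2 == m)).map (·.1)))) :=
  pv_items_fold_const L (fun p => p.2) (fun m => pvTally ((L.filter (fun q => q.2 == m)).map (·.1))) PySem.Dict.empty

-- B's pair-collecting loop is pvPairs
lemma pv_pairsB (rows : List (List (String × String))) :
    rows.foldl
      (fun acc r =>
        let c := PySem.Str.strip (((PySem.Dict.mk r).get? "class").getD "")
        if PySem.Str.strIsdigit c then
          acc ++ [((PySem.Int.ofStr? c).getD 0, ((PySem.Dict.mk r).get? "model_name").getD "")]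
        else acc)
      []
    = pvPairs rows := by
  show rows.foldl (fun acc r => if pvP r = true then acc ++ [pvF r] else acc) [] = pvPairs rows
  rw [PySem.List.foldl_append_if pvP pvF rows []]
  simp [pvPairs]

-- A reduces to the normal form
lemma pv_A_core (L : List (Int × String)) :
    ((L.foldl pvStepA (PySem.Dict.empty, PySem.Dict.empty)).1.items,
     (L.foldl pvStepA (PySem.Dict.empty, PySem.Dict.empty)).2.items.map (fun p => (p.1, p.2.items)))
    = ((PySem.Set.ofList (L.map (·.1))).map (fun k => (k, ((L.map (·.1)).count k : Int))),
       (PySem.Set.ofList (L.map (·.2))).map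
         (fun m => (m,
           (PySem.Set.ofList ((L.filter (fun q => q.2 == m)).map (·.1))).map
             (fun k => (k, (((L.filter (fun q => q.2 == m)).map (·.1)).count k : Int)))))) := by
  rw [pv_fold_split]
  rw [show ((L.foldl (fun o p => pvStepO o p.1) PySem.Dict.empty,
        L.foldl (fun bm p => bm.insert p.2 (pvStepO (bm.getD p.2 PySem.Dict.empty) p.1)) PySem.Dict.empty) :
        PySem.Dict Int Int × PySem.Dict String (PySem.Dict Int Int)).1
      = L.foldl (fun o p => pvStepO o p.1) PySem.Dict.empty from rfl]
  rw [show ((L.foldl (fun o p => pvStepO o p.1) PySem.Dict.empty,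
        L.foldl (fun bm p => bm.insert p.2 (pvStepO (bm.getD p.2 PySem.Dict.empty) p.1)) PySem.Dict.empty) :
        PySem.Dict Int Int × PySem.Dict String (PySem.Dict Int Int)).2
      = L.foldl (fun bm p => bm.insert p.2 (pvStepO (bm.getD p.2 PySem.Dict.empty) p.1)) PySem.Dict.empty from rfl]
  rw [pv_overallA, PySem.Dict.items_counter, pv_items_bmA, List.map_map]
  congr 1
  apply List.map_congr_left
  intro m _
  simp only [Function.comp]
  rw [PySem.Dict.items_counter]

lemma pv_A_eq (rows : List (List (String × String))) :
    distributions_py rows = pvOut rows := by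
  rw [show distributions_py rows
      = ((rows.foldl (fun (st : PySem.Dict Int Int × PySem.Dict String (PySem.Dict Int Int)) r =>
      let c := PySem.Str.strip (((PySem.Dict.mk r).get? "class").getD "")
      if PySem.Str.strIsdigit c then
        let label : Int := (PySem.Int.ofStr? c).getD 0
        let m := ((PySem.Dict.mk r).get? "model_name").getD ""
        let overall := st.1.insert label (st.1.getD label 0 + 1)
        let bm := st.2.setdefault m PySem.Dict.empty
        (overall, bm.insert m ((bm.getD m PySem.Dict.empty).insert label ((bm.getD m PySem.Dict.empty).getD label 0 + 1)))
      else st) (PySem.Dict.empty, PySem.Dict.empty)).1.items,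
         (rows.foldl (fun (st : PySem.Dict Int Int × PySem.Dict String (PySem.Dict Int Int)) r =>
      let c := PySem.Str.strip (((PySem.Dict.mk r).get? "class").getD "")
      if PySem.Str.strIsdigit c then
        let label : Int := (PySem.Int.ofStr? c).getD 0
        let m := ((PySem.Dict.mk r).get? "model_name").getD ""
        let overall := st.1.insert label (st.1.getD label 0 + 1)
        let bm := st.2.setdefault m PySem.Dict.empty
        (overall, bm.insert m ((bm.getD m PySem.Dict.empty).insert label ((bm.getD m PySem.Dict.empty).getD label 0 + 1)))
      else st) (PySem.Dict.empty, PySem.Dict.empty)).2.items.map (fun p => (p.1, p.2.items)))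
      from rfl]
  rw [pv_foldA]
  exact pv_A_core (pvPairs rows)

-- B reduces to the same normal form
lemma pv_B_core (L : List (Int × String)) :
    ((pvTally (L.map (·.1))).items,
     (L.foldl (fun d p => d.insert p.2 (pvTally ((L.filter (fun q => q.2 == p.2)).map (·.1)))) PySem.Dict.empty).items.map (fun p => (p.1, p.2.items)))
    = ((PySem.Set.ofList (L.map (·.1))).map (fun k => (k, ((L.map (·.1)).count k : Int))),
       (PySem.Set.ofList (L.map (·.2))).map
         (fun m => (m,
           (PySem.Set.ofList ((L.filter (fun q => q.2 == m)).map (·.1))).map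
             (fun k => (k, (((L.filter (fun q => q.2 == m)).map (·.1)).count k : Int)))))) := by
  rw [pv_items_tally, pv_items_bmB, List.map_map]
  congr 1
  apply List.map_congr_left
  intro m _
  simp only [Function.comp]
  rw [pv_items_tally]

lemma pv_B_eq (rows : List (List (String × String))) :
    distributions_py_alt rows = pvOut rows := by
  rw [show distributions_py_alt rows
      = ((pvTally ((rows.foldl (fun (acc : List (Int × String)) r =>
      let c := PySem.Str.strip (((PySem.Dict.mk r).get? "class").getD "")
      if PySem.Str.strIsdigit c then
        acc ++ [((PySem.Int.ofStr? c).getD 0, ((PySem.Dict.mk r).get? "model_name").getD "")]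
      else acc) []).map (·.1))).items,
         ((rows.foldl (fun (acc : List (Int × String)) r =>
      let c := PySem.Str.strip (((PySem.Dict.mk r).get? "class").getD "")
      if PySem.Str.strIsdigit c then
        acc ++ [((PySem.Int.ofStr? c).getD 0, ((PySem.Dict.mk r).get? "model_name").getD "")]
      else acc) []).foldl
            (fun d p => d.insert p.2 (pvTally (((rows.foldl (fun (acc : List (Int × String)) r =>
      let c := PySem.Str.strip (((PySem.Dict.mk r).get? "class").getD "")
      if PySem.Str.strIsdigit c then
        acc ++ [((PySem.Int.ofStr? c).getD 0, ((PySem.Dict.mk r).get? "model_name").getD "")]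
      else acc) []).filter (fun q => q.2 == p.2)).map (·.1))))
            PySem.Dict.empty).items.map (fun p => (p.1, p.2.items)))
      from rfl]
  rw [pv_pairsB]
  exact pv_B_core (pvPairs rows)

-- ===== VERDICT (by name: the statement is the Claim_ definition above) =====
theorem distributions_py_spec : Claim_equal_distributions_py := by
  intro rows _
  show distributions_py rows = distributions_py_alt rows
  rw [pv_A_eq, pv_B_eq]
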